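-- pv_equiv track=rewrite | github.com/mgonzalz/recursividad | ejercicio03/ejercicio03.py | ordenar_dijkstra
-- ===== SOURCE A (Python) =====
-- def ordenar_dijkstra(bandera): #Orden es: R, V, A
--     colores = {'R': 0, 'V': 0, 'A': 0}
--     i = 0
--     for color in bandera:
--         colores[color] += 1 #Cuenta la cantidad de veces que aparece cada color
--     for i in range(colores['R']): #Rellena con la R
--         bandera[i] = 'R'
--     for i in range(colores['V']):
--         bandera[i + colores['R']] = 'V' #Suma el total de R y V para rellenar con V
--     for i in range(colores['A']):
--         bandera[i + colores['R'] + colores['V']] = 'A' #Suma el total de R, V y A para rellenar con A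
--     return bandera
-- ===== SOURCE B (Python) =====
-- def ordenar_dijkstra(bandera):  # Orden es: R, V, A
--     # Single pass: append each color to its bucket, then splice the buckets back in place.
--     buckets = {'R': [], 'V': [], 'A': []}
--     for color in bandera:
--         buckets[color].append(color)
--     bandera[:] = buckets['R'] + buckets['V'] + buckets['A']
--     return bandera
-- ===== Notes on version B (the rewrite author's own statement) =====
-- stated objective: simpler
-- what changed: Replaces counting occurrences and then rewriting three index ranges in place with a single-pass partition that appends each element to its color bucket and concatenates the buckets.
import Mathlib
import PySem

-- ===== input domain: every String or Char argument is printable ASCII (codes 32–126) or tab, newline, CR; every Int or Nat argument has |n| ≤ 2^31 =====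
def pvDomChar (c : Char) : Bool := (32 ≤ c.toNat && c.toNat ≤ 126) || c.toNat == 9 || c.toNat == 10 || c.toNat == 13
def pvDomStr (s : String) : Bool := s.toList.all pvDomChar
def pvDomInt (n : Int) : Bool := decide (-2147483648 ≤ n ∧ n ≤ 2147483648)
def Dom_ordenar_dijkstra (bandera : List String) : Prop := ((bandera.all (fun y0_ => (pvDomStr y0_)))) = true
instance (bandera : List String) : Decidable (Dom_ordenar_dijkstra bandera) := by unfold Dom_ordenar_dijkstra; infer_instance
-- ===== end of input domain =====

-- B replaces A's count-then-rewrite with a one-pass three-bucket partition; both Pythons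
-- mutate `bandera` in place the same way on Pre_, and the theorems are about the return value.

-- ===== PORT A =====
-- colores[color] += 1 : Python raises KeyError when `color` is not a key (the `none` branch);
-- those inputs are excluded by Pre_ordenar_dijkstra.
def pyCountStep (d : PySem.Dict String Int) (color : String) : PySem.Dict String Int :=
  match d.get? color with
  | some n => d.insert color (n + 1)
  | none => d

def ordenar_dijkstra (bandera : List String) : List String :=
  let colores : PySem.Dict String Int :=
    ((PySem.Dict.empty.insert "R" 0).insert "V" 0).insert "A" 0
  let colores := bandera.foldl pyCountStep colores
  -- the three keys are always present, so colores['R'] etc. is getD with any default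
  let bandera := (PySem.List.pyRange 0 (colores.getD "R" 0) 1).foldl
    (fun acc i => PySem.List.pySetD acc i "R") bandera
  let bandera := (PySem.List.pyRange 0 (colores.getD "V" 0) 1).foldl
    (fun acc i => PySem.List.pySetD acc (i + colores.getD "R" 0) "V") bandera
  let bandera := (PySem.List.pyRange 0 (colores.getD "A" 0) 1).foldl
    (fun acc i => PySem.List.pySetD acc (i + colores.getD "R" 0 + colores.getD "V" 0) "A") bandera
  bandera

-- ===== PORT B =====
-- buckets[color].append(color) : Python raises KeyError when `color` is not a key (the `none`
-- branch); those inputs are excluded by Pre_ordenar_dijkstra.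
def altStep (d : PySem.Dict String (List String)) (color : String) :
    PySem.Dict String (List String) :=
  match d.get? color with
  | some l => d.insert color (l ++ [color])
  | none => d

def ordenar_dijkstra_alt (bandera : List String) : List String :=
  let buckets : PySem.Dict String (List String) :=
    ((PySem.Dict.empty.insert "R" []).insert "V" []).insert "A" []
  let buckets := bandera.foldl altStep buckets
  buckets.getD "R" [] ++ buckets.getD "V" [] ++ buckets.getD "A" []

-- ===== PRECONDITION & SPEC =====
-- Pre_ excludes exactly the inputs on which A raises KeyError (an element other than R/V/A).
def Pre_ordenar_dijkstra (bandera : List String) : Prop :=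
  ∀ s ∈ bandera, s = "R" ∨ s = "V" ∨ s = "A"
instance (bandera : List String) : Decidable (Pre_ordenar_dijkstra bandera) := by
  unfold Pre_ordenar_dijkstra; infer_instance

def pvWitness_ordenar_dijkstra : List String := ["V", "A", "R", "R", "V"]

def Spec_ordenar_dijkstra (bandera : List String) (out : List String) : Prop :=
  out = ordenar_dijkstra_alt bandera
instance (bandera : List String) (out : List String) : Decidable (Spec_ordenar_dijkstra bandera out) := by
  unfold Spec_ordenar_dijkstra; infer_instance

-- ===== CLAIM (what is proved, stated in full; the proofs are below) =====
def Claim_equal_ordenar_dijkstra : Prop := ∀ (bandera : List String),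
  Dom_ordenar_dijkstra bandera → Pre_ordenar_dijkstra bandera →
  Spec_ordenar_dijkstra bandera (ordenar_dijkstra bandera)

-- ===== LEMMAS AND PROOFS =====

-- counting loop of A: getD after the fold adds the count, as long as every key seen is present
lemma countLoop (l : List String) (d : PySem.Dict String Int) (k : String)
    (h : ∀ c ∈ l, d.contains c = true) :
    (l.foldl pyCountStep d).getD k 0 = d.getD k 0 + l.count k := by
  induction l generalizing d with
  | nil => simp
  | cons c t ih =>
    have hc : d.contains c = true := h c (by simp)
    obtain ⟨n, hn⟩ : ∃ n, d.get? c = some n := by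
      rw [PySem.Dict.contains_eq_isSome_get?] at hc
      exact Option.isSome_iff_exists.mp hc
    have hstep : pyCountStep d c = d.insert c (n + 1) := by
      simp [pyCountStep, hn]
    have ht : ∀ x ∈ t, (d.insert c (n + 1)).contains x = true := by
      intro x hx
      rw [PySem.Dict.contains_insert]
      simp [h x (by simp [hx])]
    rw [List.foldl_cons, hstep, ih _ ht]
    rw [PySem.Dict.getD_insert]
    by_cases hk : k = c
    · subst hk
      simp [PySem.Dict.getD_eq_get?_getD, hn]
      omega
    · have hk' : ¬ c = k := fun e => hk e.symm
      simp [hk, hk']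

-- a List.set at the exact length of the prefix lands at the head of the suffix
lemma set_append_len (pre rest : List String) (c : String) :
    (pre ++ rest).set pre.length c = pre ++ rest.set 0 c := by
  induction pre with
  | nil => simp
  | cons x t ih => simp [ih]

-- a fill loop of A: writing c at positions off..off+k-1
lemma fillLoop (k off : Nat) (l : List String) (c : String) (h : off + k ≤ l.length) :
    (PySem.List.pyRange 0 (k : Int) 1).foldl
      (fun acc i => PySem.List.pySetD acc (i + (off : Int)) c) l
    = l.take off ++ List.replicate k c ++ l.drop (off + k) := by
  induction k with
  | zero => simp [PySem.List.pyRange_one_eq_nil]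
  | succ k ih =>
    have : ((k : Int) + 1) = (((k + 1 : Nat)) : Int) := by push_cast; ring
    rw [← this, PySem.List.pyRange_one_succ_right (by positivity)]
    rw [List.foldl_append, ih (by omega)]
    simp only [List.foldl_cons, List.foldl_nil]
    have hcast : (k : Int) + (off : Int) = ((off + k : Nat) : Int) := by push_cast; ring
    rw [hcast, PySem.List.pySetD_natCast]
    have hlt : off + k < l.length := by omega
    have hlen : off + k = (l.take off ++ List.replicate k c).length := by
      simp [List.length_take, List.length_replicate]; omega
    have hdrop : l.drop (off + k) = l[off + k] :: l.drop (off + k + 1) := by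
      exact List.drop_eq_getElem_cons hlt
    rw [List.append_assoc, ← List.append_assoc, hlen, set_append_len, ← hlen, hdrop]
    simp [List.set, List.replicate_succ', List.append_assoc, Nat.add_assoc]

-- B's loop: each bucket ends up holding count-many copies of its color
lemma altLoop (l : List String) (d : PySem.Dict String (List String)) (k : String)
    (h : ∀ c ∈ l, d.contains c = true) :
    (l.foldl altStep d).getD k [] = d.getD k [] ++ List.replicate (l.count k) k := by
  induction l generalizing d with
  | nil => simp
  | cons c t ih =>
    have hc : d.contains c = true := h c (by simp)
    obtain ⟨b, hb⟩ : ∃ b, d.get? c = some b := by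
      rw [PySem.Dict.contains_eq_isSome_get?] at hc
      exact Option.isSome_iff_exists.mp hc
    have hstep : altStep d c = d.insert c (b ++ [c]) := by
      simp [altStep, hb]
    have ht : ∀ x ∈ t, (d.insert c (b ++ [c])).contains x = true := by
      intro x hx
      rw [PySem.Dict.contains_insert]
      simp [h x (by simp [hx])]
    rw [List.foldl_cons, hstep, ih _ ht]
    rw [PySem.Dict.getD_insert]
    by_cases hk : k = c
    · subst hk
      simp [PySem.Dict.getD_eq_get?_getD, hb, List.replicate_succ, List.append_assoc]
    · have hk' : ¬ c = k := fun e => hk e.symm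
      simp [hk, hk']

-- on R/V/A-only lists the three counts partition the length
lemma lenSplit (l : List String) (h : ∀ s ∈ l, s = "R" ∨ s = "V" ∨ s = "A") :
    l.length = l.count "R" + l.count "V" + l.count "A" := by
  induction l with
  | nil => simp
  | cons c t ih =>
    have := ih (fun s hs => h s (by simp [hs]))
    rcases h c (by simp) with hc | hc | hc <;> subst hc <;> simp <;> omega

-- ===== VERDICT (by name: the statement is the Claim_ definition above) =====
theorem ordenar_dijkstra_spec : Claim_equal_ordenar_dijkstra := by
  intro bandera _ hpre
  unfold Spec_ordenar_dijkstra
  set d0 : PySem.Dict String Int :=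
    ((PySem.Dict.empty.insert "R" 0).insert "V" 0).insert "A" 0 with hd0
  have hcont : ∀ c ∈ bandera, d0.contains c = true := by
    intro c hc
    rcases hpre c hc with h | h | h <;> subst h <;> decide
  have hR : (bandera.foldl pyCountStep d0).getD "R" 0 = (bandera.count "R" : Int) := by
    rw [countLoop _ _ _ hcont]
    have : d0.getD "R" 0 = 0 := by decide
    omega
  have hV : (bandera.foldl pyCountStep d0).getD "V" 0 = (bandera.count "V" : Int) := by
    rw [countLoop _ _ _ hcont]
    have : d0.getD "V" 0 = 0 := by decide
    omega
  have hA : (bandera.foldl pyCountStep d0).getD "A" 0 = (bandera.count "A" : Int) := by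
    rw [countLoop _ _ _ hcont]
    have : d0.getD "A" 0 = 0 := by decide
    omega
  have hsum := lenSplit bandera hpre
  set cR := bandera.count "R"
  set cV := bandera.count "V"
  set cA := bandera.count "A"
  -- A's side
  have hAeq : ordenar_dijkstra bandera =
      List.replicate cR "R" ++ List.replicate cV "V" ++ List.replicate cA "A" := by
    show (PySem.List.pyRange 0 ((bandera.foldl pyCountStep d0).getD "A" 0) 1).foldl
      (fun acc i => PySem.List.pySetD acc
        (i + (bandera.foldl pyCountStep d0).getD "R" 0 + (bandera.foldl pyCountStep d0).getD "V" 0) "A")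
      ((PySem.List.pyRange 0 ((bandera.foldl pyCountStep d0).getD "V" 0) 1).foldl
        (fun acc i => PySem.List.pySetD acc (i + (bandera.foldl pyCountStep d0).getD "R" 0) "V")
        ((PySem.List.pyRange 0 ((bandera.foldl pyCountStep d0).getD "R" 0) 1).foldl
          (fun acc i => PySem.List.pySetD acc i "R") bandera)) = _
    rw [hR, hV, hA]
    have efun1 : (fun (acc : List String) (i : Int) => PySem.List.pySetD acc i "R")
        = fun acc i => PySem.List.pySetD acc (i + ((0 : Nat) : Int)) "R" := by
      funext acc i; norm_num
    rw [efun1, fillLoop cR 0 bandera "R" (by omega)]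
    simp only [List.take_zero, List.nil_append, Nat.zero_add]
    set b1 := List.replicate cR "R" ++ bandera.drop cR with hb1
    have hlen1 : b1.length = bandera.length := by
      simp [hb1]; omega
    rw [fillLoop cV cR b1 "V" (by omega)]
    have htake1 : b1.take cR = List.replicate cR "R" := by
      rw [hb1, List.take_append_of_le_length (by simp), List.take_replicate]
      simp
    have hdrop1 : b1.drop (cR + cV) = bandera.drop (cR + cV) := by
      rw [hb1]
      conv_lhs => rw [show cR + cV = (List.replicate cR ("R" : String)).length + cV by simp]
      rw [List.drop_append, List.drop_drop]
      simp
    rw [htake1, hdrop1]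
    set b2 := List.replicate cR "R" ++ List.replicate cV "V" ++ bandera.drop (cR + cV) with hb2
    have hlen2 : b2.length = bandera.length := by
      simp [hb2]; omega
    have efun3 : (fun (acc : List String) (i : Int) =>
          PySem.List.pySetD acc (i + (cR : Int) + (cV : Int)) "A")
        = fun acc i => PySem.List.pySetD acc (i + ((cR + cV : Nat) : Int)) "A" := by
      funext acc i; push_cast; ring_nf
    rw [efun3, fillLoop cA (cR + cV) b2 "A" (by omega)]
    have htake2 : b2.take (cR + cV) = List.replicate cR "R" ++ List.replicate cV "V" := by
      rw [hb2, List.take_append_of_le_length (by simp), List.take_of_length_le (by simp)]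
    have hdrop2 : b2.drop (cR + cV + cA) = [] := by
      apply List.drop_eq_nil_of_le; omega
    rw [htake2, hdrop2]
    simp
  -- B's side
  have hBeq : ordenar_dijkstra_alt bandera =
      List.replicate cR "R" ++ List.replicate cV "V" ++ List.replicate cA "A" := by
    set e0 : PySem.Dict String (List String) :=
      ((PySem.Dict.empty.insert "R" []).insert "V" []).insert "A" [] with he0
    have hcont' : ∀ c ∈ bandera, e0.contains c = true := by
      intro c hc
      rcases hpre c hc with h | h | h <;> subst h <;> decide
    show (bandera.foldl altStep e0).getD "R" [] ++ (bandera.foldl altStep e0).getD "V" []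
        ++ (bandera.foldl altStep e0).getD "A" [] =
      List.replicate cR "R" ++ List.replicate cV "V" ++ List.replicate cA "A"
    rw [altLoop _ _ "R" hcont', altLoop _ _ "V" hcont', altLoop _ _ "A" hcont']
    have h1 : e0.getD "R" [] = [] := by decide
    have h2 : e0.getD "V" [] = [] := by decide
    have h3 : e0.getD "A" [] = [] := by decide
    rw [h1, h2, h3]
    simp only [List.nil_append, List.append_assoc]
    rfl
  rw [hAeq, hBeq]
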